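-- pv_equiv track=rewrite | github.com/raeez/chiral-bar-cobar | compute/lib/mock_modular_admissible_engine.py | _signed_theta_coeffs
-- ===== SOURCE A (Python) =====
-- from typing import Any, Dict, List, Optional, Sequence, Tuple
--
-- def _signed_theta_coeffs(m: int, r_val: int, nmax: int) -> List[int]:
--     r"""Coefficients of the signed theta function used in mock modular shadows.
--
--     psi_{m,r}(tau) = sum_{n in Z} sign(2mn+r) * q^{(2mn+r)^2/(4m)}
--
--     where sign(x) = +1 if x > 0, -1 if x < 0, 0 if x = 0.
--     This appears in the modular completion formulas.
--     """
--     coeffs = [0] * (nmax + 1)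
--     for n in range(-nmax, nmax + 1):
--         val = 2 * m * n + r_val
--         if val == 0:
--             continue
--         sgn = 1 if val > 0 else -1
--         exp_num = val * val
--         exp_denom = 4 * m
--         if exp_num % exp_denom == 0:
--             exp = exp_num // exp_denom
--             if 0 <= exp <= nmax:
--                 coeffs[exp] += sgn
--     return coeffs
-- ===== SOURCE B (Python) =====
-- import math
-- from typing import List
--
-- def _signed_theta_coeffs(m: int, r_val: int, nmax: int) -> List[int]:
--     """Same coefficients, but iterating n only over the window where
--     (2*m*n + r_val)**2 <= 4*m*nmax (and within [-nmax, nmax], the grid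
--     the truncation sums over), instead of all of [-nmax, nmax]."""
--     if nmax < 0:
--         return []
--     coeffs = [0] * (nmax + 1)
--     if m <= 0:
--         # m < 0: the exponent val^2/(4m) is negative for every val != 0;
--         # m == 0 (r_val == 0): every term has val == 0.  No contributions.
--         return coeffs
--     s = math.isqrt(4 * m * nmax)          # |val| <= s  <=>  val^2 <= 4*m*nmax
--     two_m = 2 * m
--     nlo = max(-nmax, -((s + r_val) // two_m))     # ceil((-s - r_val) / 2m)
--     nhi = min(nmax, (s - r_val) // two_m)         # floor((s - r_val) / 2m)
--     for n in range(nlo, nhi + 1):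
--         val = two_m * n + r_val
--         if val == 0:
--             continue
--         if val * val % (4 * m) == 0:
--             coeffs[val * val // (4 * m)] += 1 if val > 0 else -1
--     return coeffs
-- ===== Notes on version B (the rewrite author's own statement) =====
-- stated objective: faster
-- what changed: Instead of scanning all 2*nmax+1 values of n, B iterates n only over the window where (2mn+r)^2 <= 4m*nmax (computed with an integer sqrt), intersected with [-nmax,nmax], and returns the all-zero list directly when m <= 0 since no term can then land in [0,nmax].
import Mathlib
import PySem

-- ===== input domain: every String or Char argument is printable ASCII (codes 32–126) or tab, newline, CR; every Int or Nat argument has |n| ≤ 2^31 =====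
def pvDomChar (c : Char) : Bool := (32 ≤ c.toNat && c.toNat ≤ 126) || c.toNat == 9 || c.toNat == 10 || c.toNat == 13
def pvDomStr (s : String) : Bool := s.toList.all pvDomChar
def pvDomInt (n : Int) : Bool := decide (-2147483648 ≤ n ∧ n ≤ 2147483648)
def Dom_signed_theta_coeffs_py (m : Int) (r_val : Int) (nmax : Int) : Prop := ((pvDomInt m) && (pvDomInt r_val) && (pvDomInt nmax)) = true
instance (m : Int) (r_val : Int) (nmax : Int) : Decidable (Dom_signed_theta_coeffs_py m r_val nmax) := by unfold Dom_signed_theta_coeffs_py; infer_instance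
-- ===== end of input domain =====

-- B iterates n only over the sqrt-bounded window where (2mn+r)^2 ≤ 4m·nmax instead of all of
-- [-nmax, nmax]; measured asymptotically faster loop.  Return-value equivalence on Pre_ is proved.

-- ===== PORT A =====
-- loop body of A (coeffs[exp] += sgn: exp is guarded by 0 ≤ exp ≤ nmax < len(coeffs),
-- so List.set/getD at exp.toNat is exact Python list indexing here)
def pvStepA (m : Int) (r_val : Int) (nmax : Int) (coeffs : List Int) (n : Int) : List Int :=
  let val := 2 * m * n + r_val
  if val = 0 then coeffs
  else
    let sgn : Int := if 0 < val then 1 else -1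
    let exp_num := val * val
    let exp_denom := 4 * m
    if PySem.Int.mod exp_num exp_denom = 0 then
      let exp := PySem.Int.floordiv exp_num exp_denom
      if 0 ≤ exp ∧ exp ≤ nmax then
        coeffs.set exp.toNat (coeffs.getD exp.toNat 0 + sgn)
      else coeffs
    else coeffs

def signed_theta_coeffs_py (m : Int) (r_val : Int) (nmax : Int) : List Int :=
  (PySem.List.pyRange (-nmax) (nmax + 1) 1).foldl (pvStepA m r_val nmax)
    (List.replicate (nmax + 1).toNat 0)

-- ===== PORT B =====
-- loop body of B (no 0 ≤ exp ≤ nmax test: the window guarantees it; index is exact as in A)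
def pvStepB (m : Int) (r_val : Int) (coeffs : List Int) (n : Int) : List Int :=
  let val := 2 * m * n + r_val
  if val = 0 then coeffs
  else if PySem.Int.mod (val * val) (4 * m) = 0 then
    coeffs.set (PySem.Int.floordiv (val * val) (4 * m)).toNat
      (coeffs.getD (PySem.Int.floordiv (val * val) (4 * m)).toNat 0 + (if 0 < val then 1 else -1))
  else coeffs

def signed_theta_coeffs_py_alt (m : Int) (r_val : Int) (nmax : Int) : List Int :=
  if nmax < 0 then []
  else
    let coeffs := List.replicate (nmax + 1).toNat (0 : Int)
    if m ≤ 0 then coeffs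
    else
      -- math.isqrt(4*m*nmax); its argument is ≥ 0 on this branch
      let s : Int := ((4 * m * nmax).toNat.sqrt : Int)
      let two_m := 2 * m
      let nlo := max (-nmax) (-(PySem.Int.floordiv (s + r_val) two_m))
      let nhi := min nmax (PySem.Int.floordiv (s - r_val) two_m)
      (PySem.List.pyRange nlo (nhi + 1) 1).foldl (pvStepB m r_val) coeffs

-- ===== PRECONDITION & SPEC =====
-- Pre_ excludes exactly the inputs where A raises ZeroDivisionError (exp_num % (4*m) with m = 0,
-- reached only when r_val ≠ 0 and the loop is non-empty, i.e. nmax ≥ 0).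
def Pre_signed_theta_coeffs_py (m : Int) (r_val : Int) (nmax : Int) : Prop :=
  ¬ (m = 0 ∧ r_val ≠ 0 ∧ 0 ≤ nmax)
instance (m : Int) (r_val : Int) (nmax : Int) : Decidable (Pre_signed_theta_coeffs_py m r_val nmax) := by unfold Pre_signed_theta_coeffs_py; infer_instance

def pvWitness_signed_theta_coeffs_py : Int × Int × Int := (1, 1, 4)

def Spec_signed_theta_coeffs_py (m : Int) (r_val : Int) (nmax : Int) (out : List Int) : Prop := out = signed_theta_coeffs_py_alt m r_val nmax
instance (m : Int) (r_val : Int) (nmax : Int) (out : List Int) : Decidable (Spec_signed_theta_coeffs_py m r_val nmax out) := by unfold Spec_signed_theta_coeffs_py; infer_instance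

-- ===== CLAIM (what is proved, stated in full; the proofs are below) =====
def Claim_equal_signed_theta_coeffs_py : Prop := ∀ (m : Int) (r_val : Int) (nmax : Int), Dom_signed_theta_coeffs_py m r_val nmax → Pre_signed_theta_coeffs_py m r_val nmax → Spec_signed_theta_coeffs_py m r_val nmax (signed_theta_coeffs_py m r_val nmax)
-- ===== LEMMAS AND PROOFS =====

-- A's step contributes only under this guard chain
def pvContrib (m : Int) (r_val : Int) (nmax : Int) (n : Int) : Prop :=
  (2 * m * n + r_val ≠ 0) ∧
  PySem.Int.mod ((2 * m * n + r_val) * (2 * m * n + r_val)) (4 * m) = 0 ∧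
  0 ≤ PySem.Int.floordiv ((2 * m * n + r_val) * (2 * m * n + r_val)) (4 * m) ∧
  PySem.Int.floordiv ((2 * m * n + r_val) * (2 * m * n + r_val)) (4 * m) ≤ nmax

lemma pvStepA_id {m r_val nmax n : Int} (h : ¬ pvContrib m r_val nmax n) (c : List Int) :
    pvStepA m r_val nmax c n = c := by
  unfold pvContrib at h
  unfold pvStepA
  by_cases h0 : 2 * m * n + r_val = 0
  · simp [h0]
  · simp only [if_neg h0]
    by_cases hmod : PySem.Int.mod ((2 * m * n + r_val) * (2 * m * n + r_val)) (4 * m) = 0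
    · simp only [if_pos hmod]
      rw [if_neg]
      intro ⟨h1, h2⟩
      exact h ⟨h0, hmod, h1, h2⟩
    · simp [hmod]

lemma pv_foldl_id {f : List Int → Int → List Int} {l : List Int} {init : List Int}
    (h : ∀ c n, n ∈ l → f c n = c) : l.foldl f init = init := by
  induction l generalizing init with
  | nil => rfl
  | cons x xs ih => simp only [List.foldl_cons, h init x (by simp)]
                    exact ih (fun c n hn => h c n (by simp [hn]))

def pvS (m nmax : Int) : Int := ((4 * m * nmax).toNat.sqrt : Int)
def pvNlo (m r_val nmax : Int) : Int := max (-nmax) (-(PySem.Int.floordiv (pvS m nmax + r_val) (2 * m)))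
def pvNhi (m r_val nmax : Int) : Int := min nmax (PySem.Int.floordiv (pvS m nmax - r_val) (2 * m))

lemma pv_alt_eq {m r_val nmax : Int} (h1 : ¬ nmax < 0) (h2 : ¬ m ≤ 0) :
    signed_theta_coeffs_py_alt m r_val nmax =
      (PySem.List.pyRange (pvNlo m r_val nmax) (pvNhi m r_val nmax + 1) 1).foldl
        (pvStepB m r_val) (List.replicate (nmax + 1).toNat 0) := by
  simp [signed_theta_coeffs_py_alt, h1, h2, pvS, pvNlo, pvNhi]

-- sqrt bracketing
lemma pv_s_sq {m nmax : Int} (hm : 0 < m) (hn : 0 ≤ nmax) :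
    pvS m nmax * pvS m nmax ≤ 4 * m * nmax := by
  have hX : (0:Int) ≤ 4 * m * nmax := by positivity
  have h1 : (4 * m * nmax).toNat.sqrt ^ 2 ≤ (4 * m * nmax).toNat := Nat.sqrt_le' _
  unfold pvS
  have := Int.toNat_of_nonneg hX
  nlinarith [this, (by exact_mod_cast h1 : ((4 * m * nmax).toNat.sqrt:Int) ^ 2 ≤ ((4 * m * nmax).toNat : Int))]

lemma pv_le_s {m nmax : Int} (hm : 0 < m) (hn : 0 ≤ nmax) (v : Int)
    (hv : v * v ≤ 4 * m * nmax) : v ≤ pvS m nmax := by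
  have hs0 : (0:Int) ≤ pvS m nmax := by unfold pvS; positivity
  rcases le_or_gt v 0 with h | h
  · omega
  · have hX : (0:Int) ≤ 4 * m * nmax := by positivity
    have e1 : ((v.toNat : Int)) = v := Int.toNat_of_nonneg h.le
    have e2 : (((4 * m * nmax).toNat : Int)) = 4 * m * nmax := Int.toNat_of_nonneg hX
    have hv2 : v.toNat ^ 2 ≤ (4 * m * nmax).toNat := by
      exact_mod_cast (by rw [e1, e2]; nlinarith : ((v.toNat:Int)) ^ 2 ≤ (((4 * m * nmax).toNat : Int)))
    have := Nat.le_sqrt'.mpr hv2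
    unfold pvS
    omega

-- a contributing n within A's grid lies in B's window
lemma pv_contrib_window {m r_val nmax n : Int} (hm : 0 < m) (hn : 0 ≤ nmax)
    (hc : pvContrib m r_val nmax n) (hlo : -nmax ≤ n) (hhi : n ≤ nmax) :
    pvNlo m r_val nmax ≤ n ∧ n ≤ pvNhi m r_val nmax := by
  obtain ⟨hval, hmod, hge, hle⟩ := hc
  set v := 2 * m * n + r_val with hv
  have hx := PySem.Int.floordiv_mul_add_mod (v * v) (4 * m)
  rw [hmod, add_zero] at hx
  have hvv : v * v ≤ 4 * m * nmax := by nlinarith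
  have h1 : v ≤ pvS m nmax := pv_le_s hm hn v hvv
  have h2 : -v ≤ pvS m nmax := pv_le_s hm hn (-v) (by nlinarith)
  have h2m : (0:Int) < 2 * m := by omega
  constructor
  · unfold pvNlo
    rw [max_le_iff]
    refine ⟨hlo, ?_⟩
    have : -n ≤ PySem.Int.floordiv (pvS m nmax + r_val) (2 * m) :=
      (PySem.Int.le_floordiv_iff_mul_le h2m).mpr (by nlinarith)
    omega
  · unfold pvNhi
    rw [le_min_iff]
    refine ⟨hhi, ?_⟩
    exact (PySem.Int.le_floordiv_iff_mul_le h2m).mpr (by nlinarith)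

-- inside the window A's range check always passes, so the two step functions agree
lemma pv_step_eq {m r_val nmax n : Int} (hm : 0 < m) (hn : 0 ≤ nmax)
    (hlo : pvNlo m r_val nmax ≤ n) (hhi : n ≤ pvNhi m r_val nmax) (c : List Int) :
    pvStepA m r_val nmax c n = pvStepB m r_val c n := by
  unfold pvStepA pvStepB
  by_cases h0 : 2 * m * n + r_val = 0
  · simp [h0]
  · simp only [if_neg h0]
    by_cases hmod : PySem.Int.mod ((2 * m * n + r_val) * (2 * m * n + r_val)) (4 * m) = 0
    · simp only [if_pos hmod]
      rw [if_pos]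
      set v := 2 * m * n + r_val with hv
      have h4m : (0:Int) < 4 * m := by omega
      have h2m : (0:Int) < 2 * m := by omega
      constructor
      · exact (PySem.Int.le_floordiv_iff_mul_le h4m).mpr (by nlinarith)
      · unfold pvNlo at hlo
        unfold pvNhi at hhi
        rw [max_le_iff] at hlo
        rw [le_min_iff] at hhi
        have hA : n ≤ PySem.Int.floordiv (pvS m nmax - r_val) (2 * m) := hhi.2
        have hB : -n ≤ PySem.Int.floordiv (pvS m nmax + r_val) (2 * m) := by omega
        have hA' := (PySem.Int.le_floordiv_iff_mul_le h2m).mp hA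
        have hB' := (PySem.Int.le_floordiv_iff_mul_le h2m).mp hB
        -- v ≤ s and -v ≤ s, hence v*v ≤ s*s ≤ 4*m*nmax
        have hvv : v * v ≤ 4 * m * nmax := by nlinarith [pv_s_sq hm hn]
        by_contra hgt
        push_neg at hgt
        have := (PySem.Int.le_floordiv_iff_mul_le h4m).mp (by omega : nmax + 1 ≤ PySem.Int.floordiv (v*v) (4*m))
        nlinarith
    · simp [hmod]

theorem signed_theta_coeffs_py_spec_aux : ∀ (m r_val nmax : Int),
    Pre_signed_theta_coeffs_py m r_val nmax →
    signed_theta_coeffs_py m r_val nmax = signed_theta_coeffs_py_alt m r_val nmax := by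
  intro m r nmax hpre
  by_cases hneg : nmax < 0
  · unfold signed_theta_coeffs_py signed_theta_coeffs_py_alt
    rw [PySem.List.pyRange_one_eq_nil (by omega)]
    simp [hneg, Int.toNat_of_nonpos (by omega : nmax + 1 ≤ 0)]
  · by_cases hm : m ≤ 0
    · -- A: every iteration is a no-op; B returns the zero list
      unfold signed_theta_coeffs_py
      rw [pv_foldl_id (fun c n _ => pvStepA_id (fun hc => ?_) c)]
      · simp [signed_theta_coeffs_py_alt, hneg, hm]
      · obtain ⟨hval, hmod, hge, hle⟩ := hc
        rcases lt_or_eq_of_le hm with hlt | heq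
        · have hx := PySem.Int.floordiv_mul_add_mod ((2*m*n+r)*(2*m*n+r)) (4*m)
          rw [hmod, add_zero] at hx
          have hpos : 0 < (2*m*n+r)*(2*m*n+r) := mul_self_pos.mpr hval
          nlinarith
        · unfold Pre_signed_theta_coeffs_py at hpre
          push_neg at hpre
          have hr : r = 0 := by by_contra hr; have := hpre heq hr; omega
          exact hval (by rw [heq, hr]; ring)
    · -- main case: 0 < m, 0 ≤ nmax
      push_neg at hm hneg
      rw [pv_alt_eq (by omega) (by omega)]
      set nlo := pvNlo m r nmax with hnlo
      set nhi := pvNhi m r nmax with hnhi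
      have hlo1 : -nmax ≤ nlo := by rw [hnlo]; unfold pvNlo; exact le_max_left _ _
      have hhi1 : nhi ≤ nmax := by rw [hnhi]; unfold pvNhi; exact min_le_left _ _
      unfold signed_theta_coeffs_py
      by_cases hord : nlo ≤ nhi + 1
      · have h_pre : ∀ (c : List Int), ∀ n ∈ PySem.List.pyRange (-nmax) nlo 1,
            pvStepA m r nmax c n = c := by
          intro c n hn
          rw [PySem.List.mem_pyRange_one] at hn
          apply pvStepA_id
          intro hc
          have := pv_contrib_window hm hneg hc (by omega) (by omega)
          omega
        have h_suf : ∀ (c : List Int), ∀ n ∈ PySem.List.pyRange (nhi + 1) (nmax + 1) 1,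
            pvStepA m r nmax c n = c := by
          intro c n hn
          rw [PySem.List.mem_pyRange_one] at hn
          apply pvStepA_id
          intro hc
          have := pv_contrib_window hm hneg hc (by omega) (by omega)
          omega
        have h_mid : ∀ (c : List Int), ∀ n ∈ PySem.List.pyRange nlo (nhi + 1) 1,
            pvStepA m r nmax c n = pvStepB m r c n := by
          intro c n hn
          rw [PySem.List.mem_pyRange_one] at hn
          exact pv_step_eq hm hneg (by omega) (by omega) c
        rw [PySem.List.pyRange_one_append (-nmax) nlo (nmax+1) hlo1 (by omega),
            PySem.List.pyRange_one_append nlo (nhi+1) (nmax+1) hord (by omega),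
            List.foldl_append, List.foldl_append,
            pv_foldl_id (fun c n hn => h_suf c n hn),
            pv_foldl_id (fun c n hn => h_pre c n hn)]
        apply PySem.List.foldl_congr_mem
        exact fun c n hn => h_mid c n hn
      · -- empty window: both sides are the untouched zero list
        rw [PySem.List.pyRange_one_eq_nil (a := nlo) (b := nhi + 1) (by omega)]
        simp only [List.foldl_nil]
        apply pv_foldl_id
        intro c n hn
        apply pvStepA_id
        intro hc
        rw [PySem.List.mem_pyRange_one] at hn
        have := pv_contrib_window hm hneg hc (by omega) (by omega)
        omega

-- ===== VERDICT (by name: the statement is the Claim_ definition above) =====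
theorem signed_theta_coeffs_py_spec : Claim_equal_signed_theta_coeffs_py := by
  intro m r_val nmax _ hpre
  unfold Spec_signed_theta_coeffs_py
  exact signed_theta_coeffs_py_spec_aux m r_val nmax hpre
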